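-- pv_equiv track=rewrite | github.com/NVIDIA/OSMO | docs/_extensions/auto_include.py | _strip_rst_comments
-- ===== SOURCE A (Python) =====
-- def _strip_rst_comments(file_lines):
--     """
--     Strip leading RST comment blocks (like copyright headers) from file lines.
--
--     RST comments start with ".." followed by indented content, and can be
--     closed with another "..". This function finds the index where real
--     content begins.
--
--     Args:
--         file_lines: List of strings representing file lines
--
--     Returns:
--         int: The index of the first line of real content
--     """
--     start_idx = 0
--     in_comment = False
--
--     for j, line in enumerate(file_lines):
--         stripped = line.lstrip().rstrip()  # Remove trailing whitespace too
--
--         # Check if this is a comment marker: ".." with ONLY whitespace after (or nothing)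
--         is_comment_marker = (stripped.startswith('..') and
--                              (len(stripped) == 2 or stripped[2:].strip() == ''))
--
--         # Check if this starts or continues a comment block
--         if not in_comment:
--             # Look for comment start: ".." with nothing or only whitespace after
--             if is_comment_marker:
--                 in_comment = True
--                 continue
--             elif stripped:
--                 # First real content (not a comment)
--                 start_idx = j
--                 break
--         else:
--             # We're in a comment block
--             if not stripped:
--                 # Empty line, continue
--                 continue
--             elif line[0].isspace():
--                 # Indented line, part of comment
--                 continue
--             elif is_comment_marker:
--                 # Another ".." marker (comment closer)
--                 # Skip it and any following blank lines
--                 continue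
--             else:
--                 # Non-indented, non-comment, non-blank line - real content starts here
--                 start_idx = j
--                 break
--
--     return start_idx
-- ===== SOURCE B (Python) =====
-- def _strip_rst_comments(file_lines):
--     """Staged pipeline: materialize (index, line, stripped) triples once, filter
--     out the blank lines, then pick the answer from the heads of the filtered
--     lists instead of scanning with an in_comment flag."""
--     def is_marker(s):
--         return s.startswith('..') and s[2:].strip() == ''
--
--     triples = [(i, line, line.strip()) for i, line in enumerate(file_lines)]
--     nonblank = [t for t in triples if t[2]]
--     if not nonblank:
--         return 0
--     i0, _, s0 = nonblank[0]
--     if not is_marker(s0):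
--         return i0
--     content = [t for t in nonblank[1:]
--                if not t[1][:1].isspace() and not is_marker(t[2])]
--     return content[0][0] if content else 0
-- ===== Notes on version B (the rewrite author's own statement) =====
-- stated objective: alternative
-- what changed: Replaced A's single stateful scan (enumerate loop with an in_comment flag and break) by a staged list pipeline: materialize (index, line, stripped) triples, filter out blank lines, decide on the head of that list, and take the head of a second content filter; also drops the redundant len==2 arm of the marker test.
import Mathlib
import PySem

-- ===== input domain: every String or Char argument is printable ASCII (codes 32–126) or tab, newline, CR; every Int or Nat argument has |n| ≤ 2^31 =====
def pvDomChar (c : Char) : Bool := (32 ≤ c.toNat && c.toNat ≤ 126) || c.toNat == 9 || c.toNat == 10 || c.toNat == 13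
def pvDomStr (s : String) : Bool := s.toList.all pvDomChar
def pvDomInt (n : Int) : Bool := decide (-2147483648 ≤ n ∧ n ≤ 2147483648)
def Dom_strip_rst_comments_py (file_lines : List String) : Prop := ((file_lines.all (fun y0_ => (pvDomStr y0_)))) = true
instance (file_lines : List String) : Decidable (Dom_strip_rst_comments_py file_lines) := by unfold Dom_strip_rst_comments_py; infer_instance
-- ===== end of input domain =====

-- B replaces A's single stateful scan (in_comment flag, break) by a staged pipeline that
-- materializes the (index, line, stripped) triples, filters the blank lines away once,
-- and reads the answer off the heads of the filtered lists; objective: alternative.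

-- ===== PORT A =====
-- '..' marker test: stripped.startswith('..') and (len(stripped) == 2 or stripped[2:].strip() == '')
def pvA_isMarker (stripped : List Char) : Bool :=
  PySem.Chars.startswith stripped ['.', '.'] &&
    (stripped.length == 2 || PySem.Chars.strip (PySem.List.slice stripped (some 2) none) == [])

-- line[0].isspace()  (only evaluated by A on a line whose strip is nonempty, so 'none' is unreachable)
def pvA_firstIsSpace (line : String) : Bool :=
  match PySem.Str.pyGet? line 0 with
  | some c => PySem.Chars.isspace c
  | none => false

-- the 'for j, line in enumerate(file_lines)' loop carrying the in_comment flag; break returns j, falling off returns 0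
def pvA_loop : List (Int × String) → Bool → Int
  | [], _ => 0
  | (j, line) :: rest, inComment =>
    let stripped := PySem.Chars.rstrip (PySem.Chars.lstrip line.toList)  -- line.lstrip().rstrip()
    let isMarker := pvA_isMarker stripped
    if !inComment then
      if isMarker then pvA_loop rest true
      else if !(stripped == []) then j
      else pvA_loop rest false
    else
      if stripped == [] then pvA_loop rest true
      else if pvA_firstIsSpace line then pvA_loop rest true
      else if isMarker then pvA_loop rest true
      else j

def strip_rst_comments_py (file_lines : List String) : Int :=
  pvA_loop (PySem.List.enumerate file_lines 0) false

-- ===== PORT B =====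
-- is_marker(s): s.startswith('..') and s[2:].strip() == ''
def pvB_isMarker (s : List Char) : Bool :=
  PySem.Chars.startswith s ['.', '.'] &&
    PySem.Chars.strip (PySem.List.slice s (some 2) none) == []

-- t[1][:1].isspace() : Python str.isspace of the one-char (or empty) prefix
def pvB_headSpace (line : String) : Bool :=
  PySem.Chars.strIsspace (PySem.List.slice line.toList none (some 1))

-- triples = [(i, line, line.strip()) for i, line in enumerate(file_lines)]
def pvB_triples (xs : List String) : List (Int × String × List Char) :=
  (PySem.List.enumerate xs 0).map (fun p => (p.1, p.2, PySem.Chars.strip p.2.toList))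

def strip_rst_comments_py_alt (file_lines : List String) : Int :=
  let nonblank := (pvB_triples file_lines).filter (fun t => !(t.2.2 == []))
  match nonblank with
  | [] => 0
  | (i0, _, s0) :: rest =>
    if !(pvB_isMarker s0) then i0
    else
      match rest.filter (fun t => !(pvB_headSpace t.2.1) && !(pvB_isMarker t.2.2)) with
      | [] => 0
      | t :: _ => t.1

-- ===== PRECONDITION & SPEC =====
def Spec_strip_rst_comments_py (file_lines : List String) (out : Int) : Prop := out = strip_rst_comments_py_alt file_lines
instance (file_lines : List String) (out : Int) : Decidable (Spec_strip_rst_comments_py file_lines out) := by unfold Spec_strip_rst_comments_py; infer_instance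

-- ===== CLAIM (what is proved, stated in full; the proofs are below) =====
def Claim_equal_strip_rst_comments_py : Prop := ∀ (file_lines : List String), Dom_strip_rst_comments_py file_lines → Spec_strip_rst_comments_py file_lines (strip_rst_comments_py file_lines)

-- ===== LEMMAS AND PROOFS =====

-- generalized triples with an enumerate offset, for the loop invariants
def pvTrip (xs : List String) (i : Int) : List (Int × String × List Char) :=
  (PySem.List.enumerate xs i).map (fun p => (p.1, p.2, PySem.Chars.strip p.2.toList))

theorem pvTrip_cons (x : String) (xs : List String) (i : Int) :
    pvTrip (x :: xs) i = (i, x, PySem.Chars.strip x.toList) :: pvTrip xs (i + 1) := by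
  simp [pvTrip, PySem.List.enumerate_cons]

-- A's marker test equals B's: when startswith '..' holds and the length is exactly 2, the
-- slice s[2:] is empty, so its strip is empty and A's extra 'len == 2' arm is redundant.
theorem pv_markers_eq (s : List Char) : pvA_isMarker s = pvB_isMarker s := by
  unfold pvA_isMarker pvB_isMarker
  cases hsw : PySem.Chars.startswith s ['.', '.'] with
  | false => simp
  | true =>
    simp only [Bool.true_and]
    by_cases h2 : s.length = 2
    · have hdrop : PySem.List.slice s (some 2) none = [] := by
        rw [show (2 : Int) = ((2 : Nat) : Int) by norm_num, PySem.List.slice_from_natCast]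
        exact List.drop_eq_nil_of_le (by omega)
      have hnil : (PySem.Chars.strip ([] : List Char) == ([] : List Char)) = true := by decide
      rw [hdrop, hnil]
      simp [h2]
    · simp [h2]

theorem pv_marker_nil : pvB_isMarker [] = false := by decide

theorem pv_strip_eq (s : List Char) :
    PySem.Chars.rstrip (PySem.Chars.lstrip s) = PySem.Chars.strip s := rfl

-- strip only removes characters, so a line with a nonempty strip is itself nonempty
theorem pv_ne_nil_of_strip (s : List Char) (h : ¬ PySem.Chars.strip s = []) : s ≠ [] := by
  intro hs; exact h (by rw [hs]; rfl)

-- on a nonempty line, A's line[0].isspace() equals B's line[:1].isspace()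
theorem pv_headSpace_eq (line : String) (h : line.toList ≠ []) :
    pvA_firstIsSpace line = pvB_headSpace line := by
  unfold pvA_firstIsSpace pvB_headSpace
  cases hl : line.toList with
  | nil => exact absurd hl h
  | cons c cs =>
    have hget : PySem.Str.pyGet? line 0 = some c := by
      rw [show (0 : Int) = ((0 : Nat) : Int) by norm_num, PySem.Str.pyGet?_natCast, hl]; rfl
    have hslice : PySem.List.slice (c :: cs) none (some 1) = [c] := by
      rw [show (1 : Int) = ((1 : Nat) : Int) by norm_num, PySem.List.slice_to_natCast]; rfl
    rw [hget, hslice]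
    simp [PySem.Chars.strIsspace]

-- combined predicate that the two stacked filters of B amount to (List.filter_filter)
def pvCComb (t : Int × String × List Char) : Bool :=
  (!(pvB_headSpace t.2.1) && !(pvB_isMarker t.2.2)) && !(t.2.2 == [])

-- A's loop with in_comment = True returns the index at the head of the content-filtered triples
theorem pv_loop_true (xs : List String) : ∀ i : Int,
    pvA_loop (PySem.List.enumerate xs i) true =
      (match (pvTrip xs i).filter pvCComb with
       | [] => 0
       | t :: _ => t.1) := by
  induction xs with
  | nil => intro i; rfl
  | cons line tl ih =>
    intro i
    rw [PySem.List.enumerate_cons, pvTrip_cons]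
    simp only [pvA_loop, pv_strip_eq, pv_markers_eq, List.filter_cons]
    by_cases hs : PySem.Chars.strip line.toList = []
    · have hcc : pvCComb (i, line, []) = false := by simp [pvCComb]
      simp [hs, hcc, ih]
    · have hne := pv_ne_nil_of_strip _ hs
      rw [pv_headSpace_eq line hne]
      by_cases hh : pvB_headSpace line = true
      · have : pvCComb (i, line, PySem.Chars.strip line.toList) = false := by
          simp [pvCComb, hh]
        simp [hs, hh, this, ih]
      · by_cases hm : pvB_isMarker (PySem.Chars.strip line.toList) = true
        · have : pvCComb (i, line, PySem.Chars.strip line.toList) = false := by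
            simp [pvCComb, hm]
          simp [hs, hh, hm, this, ih]
        · have : pvCComb (i, line, PySem.Chars.strip line.toList) = true := by
            simp [pvCComb, hs, hh, hm]
          simp [hs, hh, hm, this]

-- A's loop with in_comment = False computes B's staged pipeline over the remaining triples
theorem pv_loop_false (xs : List String) : ∀ i : Int,
    pvA_loop (PySem.List.enumerate xs i) false =
      (match (pvTrip xs i).filter (fun t => !(t.2.2 == [])) with
       | [] => 0
       | (i0, _, s0) :: rest =>
         if !(pvB_isMarker s0) then i0
         else
           match rest.filter (fun t => !(pvB_headSpace t.2.1) && !(pvB_isMarker t.2.2)) with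
           | [] => 0
           | t :: _ => t.1) := by
  induction xs with
  | nil => intro i; rfl
  | cons line tl ih =>
    intro i
    rw [PySem.List.enumerate_cons, pvTrip_cons]
    simp only [pvA_loop, pv_strip_eq, pv_markers_eq, List.filter_cons]
    by_cases hs : PySem.Chars.strip line.toList = []
    · simp [hs, pv_marker_nil, ih]
    · by_cases hm : pvB_isMarker (PySem.Chars.strip line.toList) = true
      · rw [pv_loop_true tl (i + 1)]
        have hfe : List.filter pvCComb (pvTrip tl (i + 1)) =
            List.filter (fun a => (!pvB_headSpace a.2.1 && !pvB_isMarker a.2.2) && !a.2.2.isEmpty)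
              (pvTrip tl (i + 1)) := by
          refine List.filter_congr ?_
          intro t _
          simp [pvCComb]
        simp [hs, hm, List.filter_filter, hfe]
      · simp [hs, hm]

-- ===== VERDICT (by name: the statement is the Claim_ definition above) =====
theorem strip_rst_comments_py_spec : Claim_equal_strip_rst_comments_py := by
  intro file_lines _
  unfold Spec_strip_rst_comments_py strip_rst_comments_py strip_rst_comments_py_alt
  have h := pv_loop_false file_lines 0
  simpa [pvTrip, pvB_triples] using h
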